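-- pv_equiv track=rewrite | github.com/limor1994/K_means_eval | main.py | k_distance
-- ===== SOURCE A (Python) =====
-- def k_distance(sil_lst, chtc_lst):
--     distance = 0
--     for i in range(len(chtc_lst)):
--         for j in range(len(chtc_lst)):
--             if sil_lst[j] == chtc_lst[i]:
--                 distance += abs(i-j)
--                 break
--     return distance
-- ===== SOURCE B (Python) =====
-- def k_distance(sil_lst, chtc_lst):
--     n = len(chtc_lst)
--     positions = {}
--     for i, v in enumerate(chtc_lst):
--         positions.setdefault(v, []).append(i)
--     total = 0
--     for j, v in enumerate(sil_lst[:n]):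
--         idxs = positions.pop(v, None)
--         if idxs is not None:
--             for i in idxs:
--                 total += abs(i - j)
--     return total
-- ===== Notes on version B (the rewrite author's own statement) =====
-- stated objective: faster
-- what changed: Inverts A's traversal: instead of rescanning sil_lst for each chtc element, B first groups chtc_lst into an inverse index value -> list of its positions, then makes one pass over sil_lst[:n], popping each value's bucket at its first occurrence and adding all that bucket's distances at once.
import Mathlib
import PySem

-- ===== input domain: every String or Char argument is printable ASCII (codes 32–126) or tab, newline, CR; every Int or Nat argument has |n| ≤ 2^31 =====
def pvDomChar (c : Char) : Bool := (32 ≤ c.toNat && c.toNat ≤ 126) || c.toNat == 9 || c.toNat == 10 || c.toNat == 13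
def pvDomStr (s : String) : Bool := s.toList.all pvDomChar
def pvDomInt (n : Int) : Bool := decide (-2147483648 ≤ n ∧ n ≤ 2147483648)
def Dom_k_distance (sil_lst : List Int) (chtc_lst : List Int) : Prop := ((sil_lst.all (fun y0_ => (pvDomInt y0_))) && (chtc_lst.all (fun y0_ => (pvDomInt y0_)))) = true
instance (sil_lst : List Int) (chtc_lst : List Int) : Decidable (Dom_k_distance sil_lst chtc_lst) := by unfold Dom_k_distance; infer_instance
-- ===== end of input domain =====

-- B inverts A's traversal: it groups chtc_lst's positions by value once, then scans sil_lst[:n]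
-- a single time, popping each value's bucket at its first occurrence (objective: faster).

-- ===== PORT A =====
-- inner 'for j in range(len(chtc_lst))' loop with the break: the contribution of row i.
-- On j ≥ len(sil_lst) (Python's IndexError, excluded by Pre_) pyGet? is none and we return 0.
def kdInner (sil : List Int) (c : Int) (i : Int) (j : Nat) (n : Nat) : Int :=
  if j < n then
    match PySem.List.pyGet? sil (j : Int) with
    | none => 0
    | some v => if v = c then |i - (j : Int)| else kdInner sil c i (j + 1) n
  else 0
termination_by n - j

def k_distance (sil_lst : List Int) (chtc_lst : List Int) : Int :=
  (PySem.List.pyRange 0 (chtc_lst.length : Int) 1).foldl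
    (fun distance i =>
      match PySem.List.pyGet? chtc_lst i with
      | none => distance
      | some c => distance + kdInner sil_lst c i 0 chtc_lst.length) 0

-- ===== PORT B =====
-- 'positions.setdefault(v, []).append(i)' = modify v with default [] appending i (exact)
def kdBuild (chtc : List Int) : PySem.Dict Int (List Int) :=
  (PySem.List.enumerate chtc 0).foldl
    (fun d p => d.modify p.2 [] (fun l => l ++ [p.1])) PySem.Dict.empty

-- one step of 'for j, v in enumerate(sil_lst[:n])': idxs = positions.pop(v, None); add distances
def kdScanStep (st : Int × PySem.Dict Int (List Int)) (p : Int × Int) :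
    Int × PySem.Dict Int (List Int) :=
  match st.2.pop? p.2 with
  | some (idxs, d') => (idxs.foldl (fun t i => t + |i - p.1|) st.1, d')
  | none => st

def k_distance_alt (sil_lst : List Int) (chtc_lst : List Int) : Int :=
  let n := chtc_lst.length
  let positions := kdBuild chtc_lst
  ((PySem.List.enumerate (PySem.List.slice sil_lst none (some (n : Int))) 0).foldl
    kdScanStep (0, positions)).1

-- ===== PRECONDITION & SPEC =====
-- Pre_ excludes exactly the inputs where A raises IndexError: chtc_lst longer than sil_lst
-- with some chtc value absent from sil_lst (the inner scan then runs past the end of sil_lst).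
def Pre_k_distance (sil_lst : List Int) (chtc_lst : List Int) : Prop :=
  chtc_lst.length ≤ sil_lst.length ∨ ∀ x ∈ chtc_lst, x ∈ sil_lst
instance (sil_lst : List Int) (chtc_lst : List Int) : Decidable (Pre_k_distance sil_lst chtc_lst) := by
  unfold Pre_k_distance; infer_instance

def pvWitness_k_distance : List Int × List Int := ([1, 3, 2], [2, 1])

def Spec_k_distance (sil_lst : List Int) (chtc_lst : List Int) (out : Int) : Prop := out = k_distance_alt sil_lst chtc_lst
instance (sil_lst : List Int) (chtc_lst : List Int) (out : Int) : Decidable (Spec_k_distance sil_lst chtc_lst out) := by unfold Spec_k_distance; infer_instance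

-- ===== CLAIM (what is proved, stated in full; the proofs are below) =====
def Claim_equal_k_distance : Prop := ∀ (sil_lst : List Int) (chtc_lst : List Int), Dom_k_distance sil_lst chtc_lst → Pre_k_distance sil_lst chtc_lst → Spec_k_distance sil_lst chtc_lst (k_distance sil_lst chtc_lst)

-- ===== LEMMAS AND PROOFS =====
-- the common value both loop bodies compute for the chtc element at index i with value c
def contribSpec (sil : List Int) (n : Nat) (i c : Int) : Int :=
  match (sil.take n).findIdx? (fun x => x = c) with
  | some k => |i - (k : Int)|
  | none => 0

theorem kdInner_eq (sil : List Int) (c i : Int) :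
    ∀ fuel j n, n - j ≤ fuel →
      kdInner sil c i j n =
        (match ((sil.take n).drop j).findIdx? (fun x => x = c) with
         | some k => |i - ((j + k : Nat) : Int)|
         | none => 0) := by
  intro fuel
  induction fuel with
  | zero =>
    intro j n hle
    rw [kdInner]
    have hjn : ¬ j < n := by omega
    simp only [if_neg hjn]
    rw [List.drop_eq_nil_of_le (by simp; omega)]
    simp
  | succ fuel ih =>
    intro j n hle
    rw [kdInner]
    by_cases hjn : j < n
    · simp only [if_pos hjn, PySem.List.pyGet?_natCast]
      cases hget : sil[j]? with
      | none =>
        have hlen : sil.length ≤ j := by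
          by_contra h
          exact absurd hget (by simp [List.getElem?_eq_getElem (by omega : j < sil.length)])
        rw [List.drop_eq_nil_of_le (by simp; omega)]
        simp
      | some v =>
        have hjs : j < sil.length := by
          by_contra h
          rw [List.getElem?_eq_none (by omega)] at hget
          exact absurd hget (by simp)
        have hv : sil[j] = v := by
          rw [List.getElem?_eq_getElem hjs] at hget
          exact Option.some_inj.mp hget
        have hjt : j < (List.take n sil).length := by simp; omega
        rw [List.drop_eq_getElem_cons hjt, List.findIdx?_cons, List.getElem_take, hv]
        show (if v = c then |i - (j : Int)| else kdInner sil c i (j + 1) n) = _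
        by_cases hvc : v = c
        · rw [if_pos hvc, if_pos (by simp [hvc])]
          simp
        · rw [if_neg hvc, if_neg (by simp [hvc]), ih (j + 1) n (by omega)]
          cases hfi : ((List.take n sil).drop (j + 1)).findIdx? (fun x => decide (x = c)) with
          | none => simp
          | some k =>
            simp only [Option.map_some]
            congr 1
            omega
    · have hjn' : ¬ j < n := hjn
      simp only [if_neg hjn']
      rw [List.drop_eq_nil_of_le (by simp; omega)]
      simp

theorem enumerate_eq_map_range (l : List Int) :
    ∀ s : Int, PySem.List.enumerate l s =
      (List.range l.length).map (fun k : Nat => (s + (k : Int), l.getD k 0)) := by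
  induction l with
  | nil => intro s; simp [PySem.List.enumerate_nil]
  | cons x xs ih =>
    intro s
    rw [PySem.List.enumerate_cons, ih (s + 1)]
    simp only [List.length_cons, List.range_succ_eq_map, List.map_cons, List.map_map]
    congr 1
    · simp
    · apply List.map_congr_left
      intro k _
      simp only [Function.comp_apply, List.getD_cons_succ]
      congr 1
      omega

theorem A_eq (sil chtc : List Int) :
    k_distance sil chtc =
      ((PySem.List.enumerate chtc 0).map (fun p => contribSpec sil chtc.length p.1 p.2)).sum := by
  unfold k_distance
  rw [PySem.List.pyRange_zero_nat, List.foldl_map,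
    PySem.List.foldl_congr_mem _ _
      (fun acc k => acc + contribSpec sil chtc.length ((k : Nat) : Int) (chtc.getD k 0)) 0 ?_,
    PySem.List.foldl_add, enumerate_eq_map_range chtc 0, List.map_map]
  · rw [zero_add]
    apply congrArg List.sum
    apply List.map_congr_left
    intro k _
    simp [Function.comp]
  · intro acc k hk
    have hk' : k < chtc.length := List.mem_range.mp hk
    rw [PySem.List.pyGet?_natCast, List.getElem?_eq_getElem hk']
    have hg : chtc.getD k 0 = chtc[k] := by
      simp [List.getD_eq_getElem?_getD, List.getElem?_eq_getElem hk']
    show acc + kdInner sil chtc[k] (k : Int) 0 chtc.length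
        = acc + contribSpec sil chtc.length ((k : Nat) : Int) (chtc.getD k 0)
    rw [kdInner_eq sil chtc[k] (k : Int) chtc.length 0 chtc.length (by omega), hg]
    unfold contribSpec
    rw [List.drop_zero]
    cases hfi : (List.take chtc.length sil).findIdx? (fun x => decide (x = chtc[k])) with
    | none => simp
    | some m => simp

-- get? after erase, proved from the PySem.Dict representation
theorem get?_erase_dict (d : PySem.Dict Int (List Int)) (x k : Int) :
    (d.erase x).get? k = if k = x then none else d.get? k := by
  obtain ⟨l⟩ := d
  simp only [PySem.Dict.erase, PySem.Dict.get?]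
  induction l with
  | nil => simp
  | cons p ps ih =>
    by_cases hpx : p.1 = x
    · by_cases hkx : k = x
      · simp_all
      · have hpk : ¬ (p.1 == k) = true := by simp; omega
        simp_all
    · by_cases hpk : p.1 = k
      · by_cases hkx : k = x
        · omega
        · simp_all
      · simp_all

-- characterisation of the bucket dict built by the first pass
theorem build_get? : ∀ (pairs : List (Int × Int)) (d : PySem.Dict Int (List Int)) (x : Int),
    (pairs.foldl (fun d p => d.modify p.2 [] (fun l => l ++ [p.1])) d).get? x
    = if (pairs.filter (fun p => p.2 == x)) = [] then d.get? x
      else some (d.getD x [] ++ (pairs.filter (fun p => p.2 == x)).map (fun p => p.1)) := by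
  intro pairs
  induction pairs with
  | nil => intro d x; simp
  | cons p ps ih =>
    intro d x
    rw [List.foldl_cons, ih]
    by_cases hpx : p.2 = x
    · subst hpx
      by_cases hps : ps.filter (fun q => q.2 == p.2) = [] <;>
        simp [hps, PySem.Dict.modify,
          PySem.Dict.get?_insert_self, PySem.Dict.getD_insert_self]
    · have hb : (p.2 == x) = false := by simp [hpx]
      have hne : x ≠ p.2 := fun h => hpx h.symm
      simp only [PySem.Dict.modify]
      rw [PySem.Dict.get?_insert_of_ne _ _ hne, PySem.Dict.getD_insert_of_ne _ _ _ hne,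
        List.filter_cons, hb]
      simp

-- the scan's total depends on the dict only through get?
theorem scan_congr : ∀ (l : List (Int × Int)) (t : Int) (d d' : PySem.Dict Int (List Int)),
    (∀ k, d.get? k = d'.get? k) →
    (l.foldl kdScanStep (t, d)).1 = (l.foldl kdScanStep (t, d')).1 := by
  intro l
  induction l with
  | nil => intro t d d' _; rfl
  | cons p ps ih =>
    intro t d d' h
    simp only [List.foldl_cons, kdScanStep, PySem.Dict.pop?, h p.2]
    cases hg : d'.get? p.2 with
    | none => exact ih t d d' h
    | some idxs =>
      simp only [Option.map_some]
      exact ih _ _ _ (fun k => by rw [get?_erase_dict, get?_erase_dict]; split <;> simp [h k])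

theorem sum_split (pairs : List (Int × Int)) (f : Int × Int → Int) (P : Int × Int → Bool) :
    (pairs.map f).sum
      = ((pairs.filter P).map f).sum + ((pairs.filter (fun p => !P p)).map f).sum := by
  induction pairs with
  | nil => simp
  | cons p ps ih =>
    simp only [List.map_cons, List.sum_cons, List.filter_cons, ih]
    cases hp : P p <;> simp <;> ring

-- main invariant of the scan: one pass over l consumes every bucket of the pairs at the
-- first occurrence of its value in l
theorem scan_main : ∀ (l : List Int) (s t : Int) (pairs : List (Int × Int)),
    ((PySem.List.enumerate l s).foldl kdScanStep
      (t, pairs.foldl (fun d p => d.modify p.2 [] (fun q => q ++ [p.1])) PySem.Dict.empty)).1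
    = t + (pairs.map (fun p =>
        match l.findIdx? (fun y => y = p.2) with
        | some k => |p.1 - (s + (k : Int))|
        | none => 0)).sum := by
  intro l
  induction l with
  | nil =>
    intro s t pairs
    rw [PySem.List.enumerate_nil, List.foldl_nil]
    have : (pairs.map (fun p =>
        match List.findIdx? (fun y => y = p.2) [] with
        | some k => |p.1 - (s + (k : Int))|
        | none => (0 : Int))).sum = 0 := by
      apply List.sum_eq_zero; intro y hy
      obtain ⟨p, _, hp⟩ := List.mem_map.mp hy
      simp [List.findIdx?_nil] at hp
      omega
    omega
  | cons x rest ih =>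
    intro s t pairs
    rw [PySem.List.enumerate_cons, List.foldl_cons]
    have hb := build_get? pairs PySem.Dict.empty x
    by_cases hf : pairs.filter (fun p => p.2 == x) = []
    · -- value x has no bucket: state unchanged, all findIdx? go through the tail
      have hstep : kdScanStep
          (t, pairs.foldl (fun d p => d.modify p.2 [] (fun q => q ++ [p.1])) PySem.Dict.empty)
          (s, x)
          = (t, pairs.foldl (fun d p => d.modify p.2 [] (fun q => q ++ [p.1])) PySem.Dict.empty) := by
        simp [kdScanStep, PySem.Dict.pop?, hb, hf]
      rw [hstep, ih (s + 1) t pairs]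
      congr 1
      apply congrArg List.sum
      apply List.map_congr_left
      intro p hp
      have hpx : ¬ p.2 = x := by
        intro h
        have : p ∈ pairs.filter (fun q => q.2 == x) := List.mem_filter.mpr ⟨hp, by simp [h]⟩
        simp [hf] at this
      have : ¬ (decide (x = p.2)) = true := by simp; omega
      rw [List.findIdx?_cons, if_neg this]
      cases hfi : rest.findIdx? (fun y => decide (y = p.2)) with
      | none => simp
      | some k => simp; congr 1; omega
    · -- value x has a bucket: pop it, add its distances, continue on the filtered pairs
      have hstep : kdScanStep
          (t, pairs.foldl (fun d p => d.modify p.2 [] (fun q => q ++ [p.1])) PySem.Dict.empty)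
          (s, x)
          = (((pairs.filter (fun p => p.2 == x)).map (fun p => p.1)).foldl
                (fun t i => t + |i - s|) t,
             (pairs.foldl (fun d p => d.modify p.2 [] (fun q => q ++ [p.1]))
                PySem.Dict.empty).erase x) := by
        simp [kdScanStep, PySem.Dict.pop?, hb, hf]
      rw [hstep]
      -- the erased dict looks up exactly like the dict built from the pairs without value x
      have hext : ∀ k,
          ((pairs.foldl (fun d p => d.modify p.2 [] (fun q => q ++ [p.1]))
              PySem.Dict.empty).erase x).get? k
          = ((pairs.filter (fun p => !(p.2 == x))).foldl
              (fun d p => d.modify p.2 [] (fun q => q ++ [p.1])) PySem.Dict.empty).get? k := by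
        intro k
        rw [get?_erase_dict, build_get?, build_get?, List.filter_filter]
        by_cases hkx : k = x
        · subst hkx
          rw [if_pos rfl, if_pos (List.filter_eq_nil_iff.mpr (by intro p _; simp))]
          exact (PySem.Dict.get?_empty _).symm
        · have hflt : pairs.filter (fun p => (p.2 == k) && !(p.2 == x))
              = pairs.filter (fun p => p.2 == k) := by
            apply List.filter_congr
            intro p _
            by_cases h : p.2 = k
            · simp [h, hkx]
            · simp [h]
          rw [if_neg hkx, hflt]
      rw [scan_congr (PySem.List.enumerate rest (s + 1)) _ _ _ hext, ih (s + 1) _ _,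
        PySem.List.foldl_add, sum_split pairs _ (fun p => p.2 == x)]
      have h1 : (((pairs.filter (fun p => p.2 == x)).map (fun p => p.1)).map
          (fun i => |i - s|)).sum
          = ((pairs.filter (fun p => p.2 == x)).map (fun p =>
              match List.findIdx? (fun y => y = p.2) (x :: rest) with
              | some k => |p.1 - (s + (k : Int))|
              | none => (0 : Int))).sum := by
        rw [List.map_map]
        apply congrArg List.sum
        apply List.map_congr_left
        intro p hp
        have hpx : p.2 = x := by
          have := (List.mem_filter.mp hp).2
          simpa using this
        rw [List.findIdx?_cons, if_pos (by simp [hpx])]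
        simp
      have h2 : ((pairs.filter (fun p => !(p.2 == x))).map (fun p =>
            match rest.findIdx? (fun y => y = p.2) with
            | some k => |p.1 - (s + 1 + (k : Int))|
            | none => (0 : Int))).sum
          = ((pairs.filter (fun p => !(p.2 == x))).map (fun p =>
              match List.findIdx? (fun y => y = p.2) (x :: rest) with
              | some k => |p.1 - (s + (k : Int))|
              | none => (0 : Int))).sum := by
        apply congrArg List.sum
        apply List.map_congr_left
        intro p hp
        have hpx : ¬ p.2 = x := by
          have := (List.mem_filter.mp hp).2
          simpa using this
        have hxp : ¬ (decide (x = p.2)) = true := by simp; omega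
        rw [List.findIdx?_cons, if_neg hxp]
        cases hfi : rest.findIdx? (fun y => decide (y = p.2)) with
        | none => simp
        | some k => simp; congr 1; omega
      rw [h1, h2]
      ring

theorem B_eq (sil chtc : List Int) :
    k_distance_alt sil chtc =
      ((PySem.List.enumerate chtc 0).map (fun p => contribSpec sil chtc.length p.1 p.2)).sum := by
  show ((PySem.List.enumerate (PySem.List.slice sil none (some (chtc.length : Int))) 0).foldl
      kdScanStep (0, kdBuild chtc)).1 = _
  rw [PySem.List.slice_to_natCast]
  unfold kdBuild
  rw [scan_main (sil.take chtc.length) 0 0 (PySem.List.enumerate chtc 0), zero_add]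
  apply congrArg List.sum
  apply List.map_congr_left
  intro p _
  unfold contribSpec
  cases hfi : (sil.take chtc.length).findIdx? (fun y => decide (y = p.2)) with
  | none => simp
  | some k => simp

-- ===== VERDICT (by name: the statement is the Claim_ definition above) =====
theorem k_distance_spec : Claim_equal_k_distance := by
  intro sil chtc _ _
  unfold Spec_k_distance
  rw [A_eq, B_eq]
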